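-- pv_equiv track=rewrite | github.com/SDOS-2025/plek | backend/chatbot/web_agent.py | _check_missing_parameters
-- ===== SOURCE A (Python) =====
-- from typing import Dict, Any, Optional, List
--
-- def _check_missing_parameters(intent_data: Dict[str, Any]) -> list:
--     """Check for missing parameters without prompting"""
--     intent = intent_data.get('intent')
--     missing = []
--
--     if intent == 'book_room':
--         # Add purpose and participants as required fields
--         required = ['room_name', 'date', 'start_time', 'end_time', 'purpose', 'participants']
--         missing = [f for f in required if f not in intent_data]
--
--     # Modify booking now requires a booking_id for an initial request
--     # Later the specific fields to modify will be collected
--     elif intent in ['modify_booking', 'select_booking_to_modify']: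
--         if 'booking_id' not in intent_data:
--             missing.append('booking_id')
--
--     return missing
-- ===== SOURCE B (Python) =====
-- _REQUIRED = {
--     'book_room': ('room_name', 'date', 'start_time', 'end_time', 'purpose', 'participants'),
--     'modify_booking': ('booking_id',),
--     'select_booking_to_modify': ('booking_id',),
-- }
--
-- def _check_missing_parameters(intent_data):
--     """Check for missing parameters without prompting"""
--     missing = list(_REQUIRED.get(intent_data.get('intent'), ()))
--     for key in intent_data:
--         if key in missing:
--             missing.remove(key)
--     return missing
-- ===== Notes on version B (the rewrite author's own statement) =====
-- stated objective: alternative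
-- what changed: Instead of A's per-intent branches that scan the dict once per required field, B starts from a table-supplied checklist and makes a single pass over the data's keys, crossing each present key off the checklist; what remains is the answer (order preserved since removal keeps relative order).
import Mathlib
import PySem

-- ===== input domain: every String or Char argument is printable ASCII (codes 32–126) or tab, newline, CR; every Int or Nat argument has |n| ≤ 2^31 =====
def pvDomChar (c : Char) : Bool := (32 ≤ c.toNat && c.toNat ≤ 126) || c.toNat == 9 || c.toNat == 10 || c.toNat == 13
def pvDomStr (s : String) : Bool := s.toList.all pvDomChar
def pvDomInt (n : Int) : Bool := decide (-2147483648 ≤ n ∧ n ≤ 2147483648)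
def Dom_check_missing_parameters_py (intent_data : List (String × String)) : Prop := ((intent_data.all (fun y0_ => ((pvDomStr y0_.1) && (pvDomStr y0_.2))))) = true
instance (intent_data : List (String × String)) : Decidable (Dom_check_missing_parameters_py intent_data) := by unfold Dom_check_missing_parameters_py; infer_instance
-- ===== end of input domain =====

-- B replaces A's per-intent branches (each scanning the dict per required field) with a table-supplied checklist and ONE pass over the data's keys, crossing present keys off; same cost, different traversal.


-- ===== PORT A =====
-- 'f not in intent_data' on a dict tests key membership; the dict is the association list.
def check_missing_parameters_py (intent_data : List (String × String)) : List String :=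
  let intent : Option String := PySem.Dict.get? (PySem.Dict.mk intent_data) "intent"
  if intent == some "book_room" then
    let required := ["room_name", "date", "start_time", "end_time", "purpose", "participants"]
    required.filter (fun f => !(PySem.Dict.contains (PySem.Dict.mk intent_data) f))
  else if intent == some "modify_booking" || intent == some "select_booking_to_modify" then
    if !(PySem.Dict.contains (PySem.Dict.mk intent_data) "booking_id") then ["booking_id"] else []
  else []

-- ===== PORT B =====
def requiredByIntent : PySem.Dict String (List String) :=
  PySem.Dict.mk [("book_room", ["room_name", "date", "start_time", "end_time", "purpose", "participants"]),
                 ("modify_booking", ["booking_id"]),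
                 ("select_booking_to_modify", ["booking_id"])]

-- 'for key in intent_data' iterates the dict's keys; 'missing.remove(key)' removes the first
-- occurrence and is guarded by 'key in missing', so PySem.List.remove? is always some here.
def check_missing_parameters_py_alt (intent_data : List (String × String)) : List String :=
  let missing : List String :=
    match PySem.Dict.get? (PySem.Dict.mk intent_data) "intent" with
    | none => []
    | some intent => PySem.Dict.getD requiredByIntent intent []
  (PySem.Dict.keys (PySem.Dict.mk intent_data)).foldl
    (fun m k => if m.contains k then (PySem.List.remove? m k).getD m else m) missing

-- ===== PRECONDITION & SPEC =====
def Spec_check_missing_parameters_py (intent_data : List (String × String)) (out : List String) : Prop := out = check_missing_parameters_py_alt intent_data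
instance (intent_data : List (String × String)) (out : List String) : Decidable (Spec_check_missing_parameters_py intent_data out) := by unfold Spec_check_missing_parameters_py; infer_instance

-- ===== CLAIM (what is proved, stated in full; the proofs are below) =====
def Claim_equal_check_missing_parameters_py : Prop := ∀ (intent_data : List (String × String)), Dom_check_missing_parameters_py intent_data → Spec_check_missing_parameters_py intent_data (check_missing_parameters_py intent_data)

-- ===== LEMMAS AND PROOFS =====

-- Crossing off from an empty checklist keeps it empty.
theorem crossOff_nil (keys : List String) :
    keys.foldl (fun m k => if k ∈ m then (PySem.List.remove? m k).getD m else m) [] = [] := by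
  induction keys with
  | nil => rfl
  | cons k ks ih => simpa using ih

-- One crossing-off step on a duplicate-free checklist is a filter.
theorem crossOff_step (m : List String) (k : String) (hnd : m.Nodup) :
    (if m.contains k then (PySem.List.remove? m k).getD m else m)
      = m.filter (fun f => !(f == k)) := by
  by_cases h : k ∈ m
  · rw [if_pos (by simpa using h), PySem.List.remove?_eq_some_erase m k h, Option.getD_some,
        List.Nodup.erase_eq_filter hnd]
    rfl
  · rw [if_neg (by simpa using h)]
    rw [List.filter_eq_self.mpr]
    intro a ha
    simp only [Bool.not_eq_eq_eq_not, Bool.not_true]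
    exact beq_eq_false_iff_ne.mpr (fun e => h (e ▸ ha))

-- The whole crossing-off loop keeps exactly the checklist entries absent from keys.
theorem crossOff_loop (keys : List String) (m : List String) (hnd : m.Nodup) :
    keys.foldl (fun m k => if m.contains k then (PySem.List.remove? m k).getD m else m) m
      = m.filter (fun f => !(keys.contains f)) := by
  induction keys generalizing m with
  | nil => simp
  | cons k ks ih =>
    simp only [List.foldl_cons, crossOff_step m k hnd]
    rw [ih _ (hnd.filter _), List.filter_filter]
    apply List.filter_congr
    intro a _
    simp only [List.contains_cons, Bool.not_or, Bool.and_comm]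

-- Dict key membership equals membership in the keys list.
theorem dict_contains_eq_keys_contains (d : List (String × String)) (f : String) :
    PySem.Dict.contains (PySem.Dict.mk d) f = (PySem.Dict.keys (PySem.Dict.mk d)).contains f := by
  rw [Bool.eq_iff_iff]
  constructor
  · intro hh
    simp only [PySem.Dict.contains, List.any_eq_true, beq_iff_eq] at hh
    obtain ⟨p, hp, he⟩ := hh
    simp only [List.contains_iff_mem, PySem.Dict.keys]
    exact List.mem_map.mpr ⟨p, hp, he⟩
  · intro hh
    simp only [List.contains_iff_mem, PySem.Dict.keys, List.mem_map] at hh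
    obtain ⟨p, hp, he⟩ := hh
    simp only [PySem.Dict.contains, List.any_eq_true, beq_iff_eq]
    exact ⟨p, hp, he⟩

theorem filter_eq_alt (d : List (String × String)) (m : List String) (hnd : m.Nodup) :
    m.filter (fun f => !(PySem.Dict.contains (PySem.Dict.mk d) f))
      = (PySem.Dict.keys (PySem.Dict.mk d)).foldl
          (fun m k => if m.contains k then (PySem.List.remove? m k).getD m else m) m := by
  rw [crossOff_loop _ m hnd]
  apply List.filter_congr
  intro a _
  rw [dict_contains_eq_keys_contains]

-- ===== VERDICT (by name: the statement is the Claim_ definition above) =====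
theorem check_missing_parameters_py_spec : Claim_equal_check_missing_parameters_py := by
  intro d _
  unfold Spec_check_missing_parameters_py check_missing_parameters_py check_missing_parameters_py_alt
  cases h : PySem.Dict.get? (PySem.Dict.mk d) "intent" with
  | none =>
    simp
    exact crossOff_nil _
  | some s =>
    by_cases hb : s = "book_room"
    · subst hb
      rw [if_pos (by decide)]
      show List.filter (fun f => !(PySem.Dict.contains (PySem.Dict.mk d) f))
             ["room_name", "date", "start_time", "end_time", "purpose", "participants"]
          = List.foldl (fun m k => if m.contains k then (PySem.List.remove? m k).getD m else m)
              ["room_name", "date", "start_time", "end_time", "purpose", "participants"]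
              (PySem.Dict.keys (PySem.Dict.mk d))
      exact filter_eq_alt d _ (by decide)
    · by_cases hm : s = "modify_booking"
      · subst hm
        simp only []
        rw [if_neg (by decide), if_pos (by decide)]
        show (if (!PySem.Dict.contains (PySem.Dict.mk d) "booking_id") = true then ["booking_id"] else [])
            = List.foldl (fun m k => if m.contains k then (PySem.List.remove? m k).getD m else m)
                ["booking_id"] (PySem.Dict.keys (PySem.Dict.mk d))
        rw [← filter_eq_alt d ["booking_id"] (by decide)]
        by_cases hc : PySem.Dict.contains (PySem.Dict.mk d) "booking_id" = true <;>
          simp [hc, List.filter]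
      · by_cases hs : s = "select_booking_to_modify"
        · subst hs
          rw [if_neg (by decide), if_pos (by decide)]
          show (if (!PySem.Dict.contains (PySem.Dict.mk d) "booking_id") = true then ["booking_id"] else [])
              = List.foldl (fun m k => if m.contains k then (PySem.List.remove? m k).getD m else m)
                  ["booking_id"] (PySem.Dict.keys (PySem.Dict.mk d))
          rw [← filter_eq_alt d ["booking_id"] (by decide)]
          by_cases hc : PySem.Dict.contains (PySem.Dict.mk d) "booking_id" = true <;>
            simp [hc, List.filter]
        · rw [if_neg (by simp [hb]), if_neg (by simp [hm, hs])]
          have : PySem.Dict.getD requiredByIntent s [] = [] := by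
            simp only [requiredByIntent, PySem.Dict.getD, PySem.Dict.get?, List.find?]
            rw [show ("book_room" == s) = false from beq_eq_false_iff_ne.mpr (fun e => hb e.symm),
                show ("modify_booking" == s) = false from beq_eq_false_iff_ne.mpr (fun e => hm e.symm),
                show ("select_booking_to_modify" == s) = false from beq_eq_false_iff_ne.mpr (fun e => hs e.symm)]
            rfl
          refine Eq.symm ?_
          show List.foldl (fun m k => if m.contains k then (PySem.List.remove? m k).getD m else m)
                 (PySem.Dict.getD requiredByIntent s []) (PySem.Dict.keys (PySem.Dict.mk d)) = []
          rw [this, crossOff_loop _ _ List.nodup_nil]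
          rfl
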